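-- pv_equiv track=rewrite | github.com/PavelTinyakov/Python_algorithms | lesson_7/task_3.py | shell_median
-- ===== SOURCE A (Python) =====
-- def shell_median(arr):
--     inc = len(arr) // 2
--     while inc:
--         for i, el in enumerate(arr):
--             while i >= inc and arr[i - inc] > el:
--                 arr[i] = arr[i - inc]
--                 i -= inc
--             arr[i] = el
--         inc //= 2
--     return arr[len(arr) // 2]
-- ===== SOURCE B (Python) =====
-- def shell_median(arr):
--     return sorted(arr)[len(arr) // 2]
-- ===== Notes on version B (the rewrite author's own statement) =====
-- stated objective: faster
-- what changed: Replaces the in-place shell sort (hand-written gapped insertion passes over mutable indices) with a single call to the built-in Timsort and direct indexing of the lower-median position; B does not mutate its argument.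
import Mathlib
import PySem

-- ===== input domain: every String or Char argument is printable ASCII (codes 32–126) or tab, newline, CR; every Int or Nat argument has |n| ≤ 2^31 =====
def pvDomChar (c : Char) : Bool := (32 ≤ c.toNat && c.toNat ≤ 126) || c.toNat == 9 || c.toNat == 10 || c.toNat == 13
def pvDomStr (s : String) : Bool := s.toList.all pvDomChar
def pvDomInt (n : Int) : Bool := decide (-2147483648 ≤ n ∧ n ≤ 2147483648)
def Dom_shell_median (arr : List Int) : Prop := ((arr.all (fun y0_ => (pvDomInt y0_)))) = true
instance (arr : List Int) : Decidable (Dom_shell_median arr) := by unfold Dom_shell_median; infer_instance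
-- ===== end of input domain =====

-- B replaces the hand-written in-place shell sort by sorting with the library sort and
-- indexing the lower median; A mutates its argument in place, B does not — the claim is
-- about the return value only.

-- ===== PORT A =====
-- inner while loop of A for gap (g+1):  while i >= inc and arr[i-inc] > el: arr[i] = arr[i-inc]; i -= inc
-- then arr[i] = el.  The gap is passed as g with inc = g+1 (the outer while guarantees inc ≥ 1),
-- which makes the recursion terminateructurally on i.  All indices touched are in range when
-- i < arr.length, so List.getD/List.set are exact for Python's arr[...] reads/writes here.
def shellInner (g : Nat) (el : Int) (arr : List Int) (i : Nat) : List Int :=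
  if h : g + 1 ≤ i ∧ arr.getD (i - (g + 1)) 0 > el then
    shellInner g el (arr.set i (arr.getD (i - (g + 1)) 0)) (i - (g + 1))
  else
    arr.set i el
termination_by i
decreasing_by omega

-- one `for i, el in enumerate(arr)` pass for gap (g+1); the inner loop only writes at
-- indices ≤ i, so reading el from the current list at index i is exactly Python's enumerate.
def shellPass (g : Nat) (arr : List Int) : List Int :=
  (List.range arr.length).foldl (fun a i => shellInner g (a.getD i 0) a i) arr

-- the outer `while inc:` loop with `inc //= 2` (floor division on a nonnegative int = Nat division)
def shellPasses : List Int → Nat → List Int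
  | arr, 0 => arr
  | arr, g + 1 => shellPasses (shellPass g arr) ((g + 1) / 2)
termination_by _ inc => inc
decreasing_by omega

-- final `return arr[len(arr) // 2]`: the index is in range for nonempty arr (Pre_), getD is exact
def shell_median (arr : List Int) : Int :=
  let res := shellPasses arr (arr.length / 2)
  res.getD (res.length / 2) 0

-- ===== PORT B =====
-- sorted(arr)[len(arr) // 2]; the index is in range for nonempty arr (Pre_)
def shell_median_alt (arr : List Int) : Int :=
  (PySem.List.sorted arr (fun x => x) false).getD (arr.length / 2) 0

-- ===== PRECONDITION & SPEC =====
-- Pre_ excludes only the empty list, on which both A and B raise IndexError.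
def Pre_shell_median (arr : List Int) : Prop := arr ≠ []
instance (arr : List Int) : Decidable (Pre_shell_median arr) := by unfold Pre_shell_median; infer_instance
def pvWitness_shell_median : List Int := [3, 1, 2]

def Spec_shell_median (arr : List Int) (out : Int) : Prop := out = shell_median_alt arr
instance (arr : List Int) (out : Int) : Decidable (Spec_shell_median arr out) := by unfold Spec_shell_median; infer_instance

-- ===== CLAIM (what is proved, stated in full; the proofs are below) =====
def Claim_equal_shell_median : Prop := ∀ (arr : List Int), Dom_shell_median arr → Pre_shell_median arr → Spec_shell_median arr (shell_median arr)

-- ===== LEMMAS AND PROOFS =====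

-- moving a copy of l[j] to slot i and then writing el at slot j permutes like writing el at slot i
lemma cons_set_swap (el b : Int) : ∀ (k : Nat) (t : List Int), k < t.length →
    (el :: t.set k b).Perm (b :: t.set k el) := by
  intro k
  induction k with
  | zero => intro t ht; cases t with
    | nil => simp at ht
    | cons c u => simpa using List.Perm.swap b el u
  | succ k ih => intro t ht; cases t with
    | nil => simp at ht
    | cons c u =>
      simp only [List.set]
      exact ((List.Perm.swap c el _).trans ((ih u (by simpa using ht)).cons c)).trans
        (List.Perm.swap b c _)

lemma perm_set_set : ∀ (l : List Int) (j i : Nat), j < i → i < l.length → ∀ (el : Int),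
    ((l.set i (l.getD j 0)).set j el).Perm (l.set i el) := by
  intro l
  induction l with
  | nil => intro j i hji hi; simp at hi
  | cons b t ih =>
    intro j i hji hi el
    cases i with
    | zero => omega
    | succ k =>
      cases j with
      | zero =>
        simp only [List.getD_cons_zero, List.set_cons_succ, List.set_cons_zero]
        exact cons_set_swap el b k t (by simpa using hi)
      | succ j' =>
        simp only [List.getD_cons_succ, List.set_cons_succ]
        exact (ih j' k (by omega) (by simpa using hi) el).cons b

lemma shellInner_perm (g : Nat) (el : Int) : ∀ (i : Nat) (arr : List Int), i < arr.length →
    (shellInner g el arr i).Perm (arr.set i el) := by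
  intro i
  induction i using Nat.strong_induction_on with
  | _ i ih =>
    intro arr hlen
    rw [shellInner]
    split
    · next h =>
      have hj : i - (g + 1) < i := by omega
      exact (ih (i - (g + 1)) hj _ (by simp; omega)).trans
        (perm_set_set arr (i - (g + 1)) i hj hlen el)
    · exact List.Perm.refl _

-- gap-1 insertion step: sorted prefix of length i becomes a sorted prefix of length i+1
lemma insStep : ∀ (i : Nat) (arr : List Int) (el : Int), i < arr.length →
    (arr.take i).Pairwise (· ≤ ·) →
    (shellInner 0 el arr i).length = arr.length ∧
    ((shellInner 0 el arr i).take (i+1)).Pairwise (· ≤ ·) ∧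
    (shellInner 0 el arr i).drop (i+1) = arr.drop (i+1) ∧
    (∀ x ∈ (shellInner 0 el arr i).take (i+1), x = el ∨ x ∈ arr.take i) := by
  intro i
  induction i using Nat.strong_induction_on with
  | _ i ih =>
    intro arr el hlen hsort
    rw [shellInner]
    by_cases hg : 0 + 1 ≤ i ∧ arr.getD (i - (0 + 1)) 0 > el
    · rw [dif_pos hg]
      obtain ⟨hi1, hgt⟩ := hg
      have hi1' : 1 ≤ i := by omega
      have hidx : i - (0 + 1) = i - 1 := by omega
      rw [hidx] at hgt ⊢
      have him1 : i - 1 < arr.length := by omega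
      have hv : arr.getD (i - 1) 0 = arr[i - 1] := List.getD_eq_getElem arr 0 him1
      -- decomposition of the sorted prefix: arr.take i = arr.take (i-1) ++ [arr[i-1]]
      have hdec : arr.take i = arr.take (i - 1) ++ [arr[i - 1]] := by
        conv_lhs => rw [show i = (i - 1) + 1 by omega]
        rw [List.take_add_one, List.getElem?_eq_getElem him1]
        rfl
      have hle_last : ∀ x ∈ arr.take (i - 1), x ≤ arr[i - 1] := by
        have := (List.pairwise_append.mp (hdec ▸ hsort)).2.2
        intro x hx; exact this x hx _ (by simp)
      -- the recursive call on arr' = arr.set i arr[i-1]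
      have harr'len : (arr.set i (arr.getD (i - 1) 0)).length = arr.length := by simp
      have htake' : (arr.set i (arr.getD (i - 1) 0)).take (i - 1) = arr.take (i - 1) :=
        List.take_set_of_le (by omega)
      have hsort' : ((arr.set i (arr.getD (i - 1) 0)).take (i - 1)).Pairwise (· ≤ ·) := by
        rw [htake']
        exact List.Pairwise.sublist (hdec ▸ List.sublist_append_left _ _) hsort
      obtain ⟨hL, hP, hD, hM⟩ := ih (i - 1) (by omega) (arr.set i (arr.getD (i - 1) 0)) el
        (by simp; omega) hsort'
      rw [show i - 1 + 1 = i by omega] at hP hD hM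
      rw [harr'len] at hL
      -- the element now sitting at slot i is arr[i-1]
      have hri : (shellInner 0 el (arr.set i (arr.getD (i - 1) 0)) (i - 1))[i]? =
          some arr[i - 1] := by
        have h0 : (shellInner 0 el (arr.set i (arr.getD (i - 1) 0)) (i - 1))[i]?
            = ((shellInner 0 el (arr.set i (arr.getD (i - 1) 0)) (i - 1)).drop i)[0]? := by
          rw [List.getElem?_drop, Nat.add_zero]
        rw [h0, hD, List.getElem?_drop, Nat.add_zero, hv, List.getElem?_set_self hlen]
      have htk : (shellInner 0 el (arr.set i (arr.getD (i - 1) 0)) (i - 1)).take (i + 1)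
          = (shellInner 0 el (arr.set i (arr.getD (i - 1) 0)) (i - 1)).take i
            ++ [arr[i - 1]] := by
        rw [List.take_add_one, hri]; rfl
      refine ⟨hL, ?_, ?_, ?_⟩
      · rw [htk]
        refine List.pairwise_append.mpr ⟨hP, by simp, ?_⟩
        intro x hx b hb
        rw [List.mem_singleton] at hb; subst hb
        rcases hM x hx with rfl | hx'
        · rw [hv] at hgt; exact le_of_lt hgt
        · rw [htake'] at hx'; exact hle_last x hx'
      · have h1 : (shellInner 0 el (arr.set i (arr.getD (i - 1) 0)) (i - 1)).drop (i + 1)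
            = ((shellInner 0 el (arr.set i (arr.getD (i - 1) 0)) (i - 1)).drop i).drop 1 := by
          rw [List.drop_drop]
        rw [h1, hD, List.drop_drop, show i + 1 = i + 1 from rfl]
        exact List.drop_set_of_lt (by omega)
      · intro x hx
        rw [htk, List.mem_append] at hx
        rcases hx with hx | hx
        · rcases hM x hx with rfl | hx'
          · exact Or.inl rfl
          · rw [htake'] at hx'
            exact Or.inr (hdec ▸ List.mem_append_left _ hx')
        · rw [List.mem_singleton] at hx; subst hx
          exact Or.inr (hdec ▸ List.mem_append_right _ (by simp))
    · rw [dif_neg hg]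
      have htk : (arr.set i el).take (i + 1) = arr.take i ++ [el] := by
        rw [List.take_add_one, List.getElem?_set_self hlen,
          List.take_set_of_le (le_refl i)]; rfl
      have hlast : ∀ x ∈ arr.take i, x ≤ el := by
        intro x hx
        by_cases hi0 : i = 0
        · subst hi0; simp at hx
        · have hi1' : 1 ≤ i := by omega
          have him1 : i - 1 < arr.length := by omega
          have hng : ¬ arr.getD (i - (0 + 1)) 0 > el := by tauto
          have hle : arr[i - 1] ≤ el := by
            rw [show i - (0 + 1) = i - 1 by omega, List.getD_eq_getElem arr 0 him1] at hng
            omega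
          have hdec : arr.take i = arr.take (i - 1) ++ [arr[i - 1]] := by
            conv_lhs => rw [show i = (i - 1) + 1 by omega]
            rw [List.take_add_one, List.getElem?_eq_getElem him1]
            rfl
          rw [hdec, List.mem_append] at hx
          rcases hx with hx | hx
          · have := (List.pairwise_append.mp (hdec ▸ hsort)).2.2 x hx arr[i - 1] (by simp)
            omega
          · rw [List.mem_singleton] at hx; subst hx; exact hle
      refine ⟨by simp, ?_, List.drop_set_of_lt (by omega), ?_⟩
      · rw [htk]
        exact List.pairwise_append.mpr ⟨hsort, by simp, fun x hx b hb => by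
          rw [List.mem_singleton] at hb; subst hb; exact hlast x hx⟩
      · intro x hx
        rw [htk, List.mem_append] at hx
        rcases hx with hx | hx
        · exact Or.inr hx
        · rw [List.mem_singleton] at hx; exact Or.inl hx

lemma foldl_shellInner_perm (g : Nat) : ∀ (is : List Nat) (a : List Int),
    (∀ i ∈ is, i < a.length) →
    (is.foldl (fun a i => shellInner g (a.getD i 0) a i) a).Perm a := by
  intro is
  induction is with
  | nil => intro a _; exact List.Perm.refl a
  | cons i is ih =>
    intro a hb
    have hi : i < a.length := hb i (by simp)
    have hstep : (shellInner g (a.getD i 0) a i).Perm a := by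
      have hset : a.set i (a.getD i 0) = a := by
        rw [List.getD_eq_getElem a 0 hi]; exact List.set_getElem_self hi
      have h2 := shellInner_perm g (a.getD i 0) i a hi
      rwa [hset] at h2
    simp only [List.foldl_cons]
    refine (ih _ ?_).trans hstep
    intro j hj
    rw [hstep.length_eq]
    exact hb j (by simp [hj])

lemma shellPass_perm (g : Nat) (arr : List Int) : (shellPass g arr).Perm arr := by
  unfold shellPass
  exact foldl_shellInner_perm g (List.range arr.length) arr
    (fun i hi => List.mem_range.mp hi)

lemma foldl_shellInner0_sorted : ∀ (n : Nat) (a : List Int), n ≤ a.length →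
    ((List.range n).foldl (fun a i => shellInner 0 (a.getD i 0) a i) a).length = a.length ∧
    (((List.range n).foldl (fun a i => shellInner 0 (a.getD i 0) a i) a).take n).Pairwise (· ≤ ·) := by
  intro n
  induction n with
  | zero => intro a _; simp
  | succ n ih =>
    intro a hn
    obtain ⟨hl, hs⟩ := ih a (by omega)
    rw [List.range_succ, List.foldl_append, List.foldl_cons, List.foldl_nil]
    have hn' : n < ((List.range n).foldl (fun a i => shellInner 0 (a.getD i 0) a i) a).length := by
      omega
    obtain ⟨hL, hP, _, _⟩ := insStep n _ (((List.range n).foldl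
      (fun a i => shellInner 0 (a.getD i 0) a i) a).getD n 0) hn' hs
    exact ⟨by omega, hP⟩

lemma shellPass0_sorted (arr : List Int) : (shellPass 0 arr).Pairwise (· ≤ ·) := by
  unfold shellPass
  obtain ⟨hl, hs⟩ := foldl_shellInner0_sorted arr.length arr (le_refl _)
  rwa [List.take_of_length_le (by omega)] at hs

lemma shellPasses_good : ∀ (inc : Nat) (arr : List Int), 1 ≤ inc →
    (shellPasses arr inc).Pairwise (· ≤ ·) ∧ (shellPasses arr inc).Perm arr := by
  intro inc
  induction inc using Nat.strong_induction_on with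
  | _ inc ih =>
    intro arr hinc
    match inc, hinc with
    | 1, _ =>
      rw [shellPasses]
      norm_num
      rw [shellPasses]
      exact ⟨shellPass0_sorted arr, shellPass_perm 0 arr⟩
    | g + 2, _ =>
      rw [shellPasses]
      have h1 : 1 ≤ (g + 2) / 2 := by omega
      obtain ⟨hs, hp⟩ := ih ((g + 2) / 2) (by omega) (shellPass (g + 1) arr) h1
      exact ⟨hs, hp.trans (shellPass_perm (g + 1) arr)⟩

-- ===== VERDICT (by name: the statement is the Claim_ definition above) =====
theorem shell_median_spec : Claim_equal_shell_median := by
  intro arr _ hpre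
  unfold Spec_shell_median shell_median shell_median_alt
  have hgood : (shellPasses arr (arr.length / 2)).Pairwise (· ≤ ·) ∧
      (shellPasses arr (arr.length / 2)).Perm arr := by
    by_cases h : arr.length / 2 = 0
    · have h1 : arr.length = 1 := by
        have : arr.length ≠ 0 := by simpa [List.length_eq_zero_iff] using hpre
        omega
      obtain ⟨x, hx⟩ := List.length_eq_one_iff.mp h1
      rw [h]
      subst hx
      exact ⟨by simp [shellPasses], by simp [shellPasses]⟩
    · exact shellPasses_good (arr.length / 2) arr (by omega)
  show (shellPasses arr (arr.length / 2)).getD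
      ((shellPasses arr (arr.length / 2)).length / 2) 0 = _
  rw [PySem.List.sorted_id_eq_of_perm_of_pairwise _ _ hgood.2 hgood.1,
    hgood.2.length_eq]
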